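-- pv_equiv track=rewrite | github.com/zett-8/competitive_programming | codeForces/book_reading.py | add_first_nums
-- ===== SOURCE A (Python) =====
-- def add_first_nums(s, t):
--     sm = 0
--     tmp = s
--     for _ in range(t):
--         sm += tmp
--         tmp += s
--         tmp = int(str(tmp)[-1])
--     return sm
-- ===== SOURCE B (Python) =====
-- def add_first_nums(s, t):
--     # The last-digit sequence lives on {0..9}, so it is eventually periodic with
--     # some cycle length in 1..10; 2520 = lcm(1..10) is a period from index 10 on.
--     if t <= 0:
--         return 0
--     steps = t - 1
--     P = 2520
--     d = []
--     cur = abs(2 * s) % 10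
--     for _ in range(10 + P):
--         d.append(cur)
--         cur = abs(cur + s) % 10
--     if steps <= 10:
--         return s + sum(d[:steps])
--     q, r = divmod(steps - 10, P)
--     return s + sum(d[:10]) + q * sum(d[10:]) + sum(d[10:10 + r])
-- ===== Notes on version B (the rewrite author's own statement) =====
-- stated objective: faster
-- what changed: Instead of iterating the last-digit recurrence t times, B materialises only the first 10+2520 terms and uses the fact that the sequence is periodic with period 2520 = lcm(1..10) from index 10 on, closing the sum with divmod arithmetic.
import Mathlib
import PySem

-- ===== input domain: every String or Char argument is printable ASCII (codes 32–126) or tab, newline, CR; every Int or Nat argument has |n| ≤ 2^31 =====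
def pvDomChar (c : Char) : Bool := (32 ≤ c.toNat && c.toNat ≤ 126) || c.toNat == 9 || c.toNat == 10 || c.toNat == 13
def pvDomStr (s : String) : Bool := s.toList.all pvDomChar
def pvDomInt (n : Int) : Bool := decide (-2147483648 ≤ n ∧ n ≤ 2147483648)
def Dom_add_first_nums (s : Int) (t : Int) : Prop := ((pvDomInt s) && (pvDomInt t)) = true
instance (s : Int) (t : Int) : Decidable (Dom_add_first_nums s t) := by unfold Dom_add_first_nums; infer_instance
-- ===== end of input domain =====

-- B replaces A's O(t) loop by constant work: the last-digit sequence is periodic with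
-- period 2520 = lcm(1..10) from index 10 on, so the sum has a closed divmod form.

-- ===== PORT A =====
-- int(str(tmp)[-1]) ported by hand: str → PySem.Int.toStr, [-1] → PySem.Str.pyGet?, int → PySem.Int.ofStr?.
-- str(tmp) is nonempty and its last character is a decimal digit, so both options are
-- always `some`; the `getD`/`none` defaults are unreachable (proved in pyIntLastDigit_eq below).
def pyIntLastDigit (n : Int) : Int :=
  match PySem.Str.pyGet? (PySem.Int.toStr n) (-1) with
  | some c => (PySem.Int.ofStr? (String.ofList [c])).getD 0
  | none => 0

def add_first_nums (s : Int) (t : Int) : Int :=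
  ((PySem.List.pyRange 0 t 1).foldl
      (fun (st : Int × Int) _ =>
        let sm := st.1 + st.2
        let tmp := st.2 + s
        (sm, pyIntLastDigit tmp))
      (0, s)).1

-- ===== PORT B =====
def add_first_nums_alt (s : Int) (t : Int) : Int :=
  if t ≤ 0 then 0
  else
    let steps := t - 1
    let P : Int := 2520  -- divisible by every cycle length 1..10 of the last-digit map
    let d := ((PySem.List.pyRange 0 (10 + P) 1).foldl
        (fun (st : List Int × Int) _ =>
          (st.1 ++ [st.2], PySem.Int.mod |st.2 + s| 10))
        ([], PySem.Int.mod |2 * s| 10)).1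
    if steps ≤ 10 then s + (PySem.List.slice d none (some steps)).sum
    else
      let qr := (PySem.Int.divmod? (steps - 10) P).getD (0, 0)  -- P ≠ 0: never none
      s + (PySem.List.slice d none (some 10)).sum
        + qr.1 * (PySem.List.slice d (some 10) none).sum
        + (PySem.List.slice d (some 10) (some (10 + qr.2))).sum

-- ===== PRECONDITION & SPEC =====
def Spec_add_first_nums (s : Int) (t : Int) (out : Int) : Prop := out = add_first_nums_alt s t
instance (s : Int) (t : Int) (out : Int) : Decidable (Spec_add_first_nums s t out) := by unfold Spec_add_first_nums; infer_instance

-- ===== CLAIM (what is proved, stated in full; the proofs are below) =====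
def Claim_equal_add_first_nums : Prop := ∀ (s : Int) (t : Int), Dom_add_first_nums s t → Spec_add_first_nums s t (add_first_nums s t)

-- ===== LEMMAS AND PROOFS =====

/-- The digit sequence: `dN s 0` = last digit of `2*s`, thereafter last digit of `prev + s`. -/
def dN (s : Int) : ℕ → ℕ
  | 0 => (2 * s).natAbs % 10
  | k + 1 => (((dN s k : ℤ)) + s).natAbs % 10

lemma dN_lt (s : Int) (k : ℕ) : dN s k < 10 := by
  cases k <;> (simp [dN]; omega)

-- `Nat.toDigitsCore` only prepends to its accumulator.
lemma toDigitsCore_append (b : ℕ) : ∀ (f n : ℕ) (ds : List Char),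
    Nat.toDigitsCore b f n ds = Nat.toDigitsCore b f n [] ++ ds := by
  intro f
  induction f with
  | zero => intro n ds; simp [Nat.toDigitsCore]
  | succ f ih =>
    intro n ds
    simp only [Nat.toDigitsCore]
    by_cases h : n / b = 0
    · simp [h]
    · simp only [h, if_false]
      rw [ih (n / b) (Nat.digitChar (n % b) :: ds), ih (n / b) [Nat.digitChar (n % b)]]
      simp

lemma toDigits_getLast? (m : ℕ) :
    (Nat.toDigits 10 m).getLast? = some (Nat.digitChar (m % 10)) := by
  unfold Nat.toDigits
  simp only [Nat.toDigitsCore]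
  by_cases h : m / 10 = 0
  · simp [h]
  · simp only [h, if_false]
    rw [toDigitsCore_append 10 m (m / 10) [Nat.digitChar (m % 10)]]
    simp

lemma toDigits_ne_nil (m : ℕ) : Nat.toDigits 10 m ≠ [] := by
  intro h
  have := toDigits_getLast? m
  rw [h] at this
  simp at this

lemma toChars_getLast? (n : Int) :
    (PySem.Int.toChars n).getLast? = some (Nat.digitChar (n.natAbs % 10)) := by
  unfold PySem.Int.toChars
  by_cases h : n < 0
  · simp only [h, if_true]
    have h2 := toDigits_getLast? n.natAbs
    rcases hl : Nat.toDigits 10 n.natAbs with _ | ⟨c, cs⟩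
    · exact absurd hl (toDigits_ne_nil _)
    · rw [hl] at h2; simpa using h2
  · simp only [h, if_false]
    rw [show n.toNat = n.natAbs from by omega]
    exact toDigits_getLast? n.natAbs

/-- `int(str(n)[-1])` is `|n| % 10`. -/
lemma pyIntLastDigit_eq (n : Int) : pyIntLastDigit n = ((n.natAbs % 10 : ℕ) : ℤ) := by
  unfold pyIntLastDigit
  have h1 : PySem.Str.pyGet? (PySem.Int.toStr n) (-1)
      = some (Nat.digitChar (n.natAbs % 10)) := by
    rw [show PySem.Str.pyGet? (PySem.Int.toStr n) (-1)
        = PySem.List.pyGet? (PySem.Int.toChars n) (-1) from by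
      simp [PySem.Str.pyGet?, PySem.Chars.pyGet?_eq_listPyGet?, PySem.Int.toList_toStr]]
    rw [PySem.List.pyGet?_neg_one, toChars_getLast?]
  rw [h1]
  have h10 : n.natAbs % 10 < 10 := Nat.mod_lt _ (by norm_num)
  set k := n.natAbs % 10 with hk
  interval_cases k <;> decide

/-- One iteration of A's loop body. -/
def stepA (s : Int) (st : Int × Int) : Int × Int :=
  (st.1 + st.2, pyIntLastDigit (st.2 + s))

lemma foldl_const (f : Int × Int → Int × Int) :
    ∀ (l : List Int) (init : Int × Int),
      l.foldl (fun st _ => f st) init = f^[l.length] init := by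
  intro l
  induction l with
  | nil => intro init; simp
  | cons x xs ih =>
    intro init
    simp [List.foldl_cons, ih, Function.iterate_succ_apply]

lemma pyRange_length (t : Int) : (PySem.List.pyRange 0 t 1).length = t.toNat := by
  unfold PySem.List.pyRange
  by_cases h : 0 < t <;> simp [h] <;> omega

lemma stepA_iterate (s : Int) (k : ℕ) :
    (stepA s)^[k + 1] (0, s) = (s + ∑ j ∈ Finset.range k, ((dN s j : ℤ)), (dN s k : ℤ)) := by
  induction k with
  | zero =>
    have h2 : s + s = 2 * s := by ring
    simp [stepA, pyIntLastDigit_eq, h2, dN]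
  | succ k ih =>
    rw [Function.iterate_succ_apply', ih]
    simp [stepA, pyIntLastDigit_eq, Finset.sum_range_succ, dN]
    ring

lemma A_eq (s t : Int) :
    add_first_nums s t
      = if t ≤ 0 then 0 else s + ∑ j ∈ Finset.range (t.toNat - 1), ((dN s j : ℤ)) := by
  unfold add_first_nums
  rw [show (fun (st : Int × Int) (_ : Int) =>
      (st.1 + st.2, pyIntLastDigit (st.2 + s))) = (fun st _ => stepA s st) from rfl]
  rw [foldl_const, pyRange_length]
  by_cases h : t ≤ 0
  · have : t.toNat = 0 := by omega
    simp [this, h]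
  · have ht : t.toNat = (t.toNat - 1) + 1 := by omega
    rw [if_neg h, ht, stepA_iterate]
    simp

-- B's list-building fold produces the first `l.length` iterates of `g`.
lemma foldl_build (g : Int → Int) :
    ∀ (l : List Int) (acc : List Int) (c : Int),
      l.foldl (fun (st : List Int × Int) _ => (st.1 ++ [st.2], g st.2)) (acc, c)
        = (acc ++ (List.range l.length).map (fun j => g^[j] c), g^[l.length] c) := by
  intro l
  induction l with
  | nil => intro acc c; simp
  | cons x xs ih =>
    intro acc c
    rw [List.foldl_cons, ih]
    simp [List.range_succ_eq_map, List.map_map, Function.comp_def,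
      Function.iterate_succ_apply]

lemma mod_abs_eq (x : Int) : PySem.Int.mod |x| 10 = ((x.natAbs % 10 : ℕ) : ℤ) := by
  simp only [PySem.Int.mod, Int.fmod_eq_emod, Int.abs_eq_natAbs]
  norm_num

lemma gstep_iterate (s : Int) (j : ℕ) :
    (fun x => PySem.Int.mod |x + s| 10)^[j] (PySem.Int.mod |2 * s| 10) = ((dN s j : ℤ)) := by
  induction j with
  | zero => simpa [dN] using mod_abs_eq (2 * s)
  | succ j ih =>
    rw [Function.iterate_succ_apply', ih]
    simpa [dN] using mod_abs_eq ((dN s j : ℤ) + s)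

lemma sum_map_range (f : ℕ → ℤ) (n : ℕ) :
    ((List.range n).map f).sum = ∑ j ∈ Finset.range n, f j := by
  induction n with
  | zero => simp
  | succ n ih => simp [List.range_succ, Finset.sum_range_succ, ih]

lemma periodic_sum (e : ℕ → ℤ) (P : ℕ) (hP : 0 < P) (hper : ∀ j, e (j + P) = e j) :
    ∀ m, ∑ j ∈ Finset.range m, e j
      = ((m / P : ℕ) : ℤ) * ∑ j ∈ Finset.range P, e j + ∑ j ∈ Finset.range (m % P), e j := by
  intro m
  induction m using Nat.strong_induction_on with
  | _ m ih =>
    by_cases h : m < P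
    · rw [Nat.div_eq_of_lt h, Nat.mod_eq_of_lt h]; simp
    · have hm : m = P + (m - P) := by omega
      rw [hm, Finset.sum_range_add]
      have hco : ∀ j ∈ Finset.range (m - P), e (P + j) = e j := by
        intro j _; rw [Nat.add_comm]; exact hper j
      rw [Finset.sum_congr rfl hco, ih (m - P) (by omega)]
      rw [show P + (m - P) = (m - P) + P from by omega,
        Nat.add_div_right _ hP, Nat.add_mod_right]
      push_cast
      ring

lemma dN_period_from (s : Int) (i p : ℕ) (h : dN s (i + p) = dN s i) :
    ∀ k, dN s (i + k + p) = dN s (i + k) := by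
  intro k
  induction k with
  | zero => simpa using h
  | succ k ih =>
    rw [show i + (k + 1) + p = (i + k + p) + 1 from by omega,
      show i + (k + 1) = (i + k) + 1 from by omega]
    simp [dN, ih]

lemma dN_period_mul (s : Int) (i p : ℕ) (h : dN s (i + p) = dN s i) :
    ∀ (m k : ℕ), dN s (i + k + m * p) = dN s (i + k) := by
  intro m
  induction m with
  | zero => intro k; simp
  | succ m ih =>
    intro k
    rw [show i + k + (m + 1) * p = i + (k + m * p) + p from by ring,
      dN_period_from s i p h (k + m * p),
      show i + (k + m * p) = i + k + m * p from by ring]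
    exact ih k

lemma dN_repeat (s : Int) : ∃ i p, i ≤ 9 ∧ 1 ≤ p ∧ p ≤ 10 ∧ dN s (i + p) = dN s i := by
  have hmaps : ∀ k ∈ Finset.range 11, dN s k ∈ Finset.range 10 := by
    intro k _; exact Finset.mem_range.mpr (dN_lt s k)
  have hcard : (Finset.range 10).card < (Finset.range 11).card := by simp
  obtain ⟨x, hx, y, hy, hxy, hexy⟩ :=
    Finset.exists_ne_map_eq_of_card_lt_of_maps_to hcard hmaps
  simp only [Finset.mem_range] at hx hy
  rcases Nat.lt_or_ge x y with hlt | hge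
  · exact ⟨x, y - x, by omega, by omega, by omega,
      by rw [show x + (y - x) = y from by omega]; exact hexy.symm⟩
  · have hlt : y < x := by omega
    exact ⟨y, x - y, by omega, by omega, by omega,
      by rw [show y + (x - y) = x from by omega]; exact hexy⟩

lemma dN_period_2520 (s : Int) (k : ℕ) (hk : 10 ≤ k) : dN s (k + 2520) = dN s k := by
  obtain ⟨i, p, hi, hp1, hp10, hrep⟩ := dN_repeat s
  obtain ⟨m, hm⟩ : p ∣ 2520 := by interval_cases p <;> decide
  have h2 := dN_period_mul s i p hrep m (k - i)
  rw [show i + (k - i) = k from by omega] at h2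
  rw [show k + 2520 = k + m * p from by rw [hm]; ring]
  exact h2

lemma take_map_range (f : ℕ → ℤ) (k m : ℕ) (h : k ≤ m) :
    ((List.range m).map f).take k = (List.range k).map f := by
  rw [← List.map_take, List.take_range, min_eq_left h]

lemma drop10_map_range (f : ℕ → ℤ) :
    ((List.range 2530).map f).drop 10 = (List.range 2520).map (fun j => f (10 + j)) := by
  rw [show (2530 : ℕ) = 10 + 2520 from rfl, List.range_add, List.map_append]
  rw [List.drop_left' (by simp : ((List.range 10).map f).length = 10)]
  simp [List.map_map, Function.comp_def]

lemma B_eq (s t : Int) (h : ¬ t ≤ 0) :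
    add_first_nums_alt s t =
      if t - 1 ≤ 10 then s + ∑ j ∈ Finset.range (t.toNat - 1), ((dN s j : ℤ))
      else s + ∑ j ∈ Finset.range 10, ((dN s j : ℤ))
        + (((t.toNat - 11) / 2520 : ℕ) : ℤ) * ∑ j ∈ Finset.range 2520, ((dN s (10 + j) : ℤ))
        + ∑ j ∈ Finset.range ((t.toNat - 11) % 2520), ((dN s (10 + j) : ℤ)) := by
  have hlen : (PySem.List.pyRange 0 (10 + 2520) 1).length = 2530 := by
    rw [pyRange_length]; rfl
  simp only [add_first_nums_alt, h, if_false]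
  rw [foldl_build (fun x => PySem.Int.mod |x + s| 10) (PySem.List.pyRange 0 (10 + 2520) 1)
    [] (PySem.Int.mod |2 * s| 10), hlen, List.nil_append]
  rw [List.map_congr_left (fun j _ => gstep_iterate s j)]
  by_cases hb : t - 1 ≤ 10
  · rw [if_pos hb, if_pos hb]
    rw [PySem.List.slice_to _ (by omega : (0:ℤ) ≤ t - 1)]
    rw [take_map_range _ _ _ (by omega : (t-1).toNat ≤ 2530), sum_map_range]
    rw [show (t - 1).toNat = t.toNat - 1 from by omega]
  · rw [if_neg hb, if_neg hb]
    have ht11 : t - 1 - 10 = (((t.toNat - 11 : ℕ)) : ℤ) := by omega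
    have hqr : (PySem.Int.divmod? (t - 1 - 10) 2520).getD (0, 0)
        = ((((t.toNat - 11) / 2520 : ℕ) : ℤ), (((t.toNat - 11) % 2520 : ℕ) : ℤ)) := by
      simp only [PySem.Int.divmod?, if_neg (by norm_num : (2520 : ℤ) ≠ 0), Option.getD_some]
      rw [ht11, Int.fdiv_eq_ediv, Int.fmod_eq_emod]
      norm_num
    rw [hqr]
    rw [PySem.List.slice_to _ (by norm_num : (0:ℤ) ≤ 10)]
    rw [show ((10:ℤ).toNat) = 10 from rfl]
    rw [take_map_range _ _ _ (by norm_num), sum_map_range]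
    rw [PySem.List.slice_from _ (by norm_num : (0:ℤ) ≤ 10)]
    rw [show ((10:ℤ).toNat) = 10 from rfl, drop10_map_range, sum_map_range]
    have hr : (10 : ℤ) + (((t.toNat - 11) % 2520 : ℕ) : ℤ)
        = (((10 + (t.toNat - 11) % 2520 : ℕ)) : ℤ) := by push_cast; ring
    rw [hr, show (10:ℤ) = ((10:ℕ):ℤ) from rfl, PySem.List.slice_natCast]
    rw [Nat.add_sub_cancel_left]
    have hrle : (t.toNat - 11) % 2520 ≤ 2520 := le_of_lt (Nat.mod_lt _ (by norm_num))
    rw [drop10_map_range, take_map_range _ _ _ hrle, sum_map_range]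

-- ===== VERDICT (by name: the statement is the Claim_ definition above) =====
theorem add_first_nums_spec : Claim_equal_add_first_nums := by
  intro s t _
  unfold Spec_add_first_nums
  rw [A_eq]
  by_cases h : t ≤ 0
  · rw [if_pos h]
    simp [add_first_nums_alt, h]
  · rw [if_neg h, B_eq s t h]
    by_cases hb : t - 1 ≤ 10
    · rw [if_pos hb]
    · rw [if_neg hb]
      have hN : t.toNat - 1 = 10 + (t.toNat - 11) := by omega
      rw [hN, Finset.sum_range_add]
      have hper : ∀ j, ((dN s (10 + (j + 2520)) : ℤ)) = ((dN s (10 + j) : ℤ)) := by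
        intro j
        rw [show 10 + (j + 2520) = (10 + j) + 2520 from by ring,
          dN_period_2520 s (10 + j) (by omega)]
      rw [periodic_sum (fun j => ((dN s (10 + j) : ℤ))) 2520 (by norm_num) hper (t.toNat - 11)]
      ring
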